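-- pv_equiv track=rewrite | github.com/Jo-Chang/TIL | kdt2_TIL/week05/day2/python/11286-절댓값_힙.py | my_heappop
-- ===== SOURCE A (Python) =====
-- def compare(a, b):
--     if abs(a) > abs(b):
--         return True
--     elif abs(a) == abs(b):
--         if a > b:
--             return True
--         else:
--             return False
--     else:
--         return False
--
-- def my_heappop(num_lst):
--     num_lst[0], num_lst[len(num_lst) - 1] = num_lst[len(num_lst) - 1], num_lst[0]
--     idx = 0
--
--     # DownHeap
--     while 2*idx + 2 < len(num_lst) - 1:
--         left = 2*idx + 1
--         right = 2*idx + 2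
--         if compare(num_lst[left], num_lst[right]): # Case - left greater
--             if compare(num_lst[idx], num_lst[right]):
--                 num_lst[idx], num_lst[right] = num_lst[right], num_lst[idx]
--                 idx = right
--             else:
--                 break
--         else: # Case - right greater
--             if compare(num_lst[idx], num_lst[left]):
--                 num_lst[idx], num_lst[left] = num_lst[left], num_lst[idx]
--                 idx = left
--             else:
--                 break
--
--     # Case - after while (only left child)
--     last_left = 2*idx + 1
--     if last_left == len(num_lst) - 2:
--         if compare(num_lst[idx], num_lst[last_left]):
--             num_lst[idx], num_lst[last_left] = num_lst[last_left], num_lst[idx]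
--
--     # Remove and return ex-root node
--     return num_lst.pop()
-- ===== SOURCE B (Python) =====
-- def my_heappop(num_lst):
--     # Pop the root directly, move the last element into its place, and restore
--     # the heap invariant by SORTING the remainder under the comparator's key
--     # (abs(x), x): a list sorted by that key is a valid binary min-heap for
--     # compare, so no sift-down is needed at all.
--     root = num_lst[0]
--     num_lst[0] = num_lst[len(num_lst) - 1]
--     num_lst.pop()
--     num_lst.sort(key=lambda x: (abs(x), x))
--     return root
-- ===== Notes on version B (the rewrite author's own statement) =====
-- stated objective: simpler
-- what changed: B drops the sift-down entirely: it pops the root directly and restores the heap invariant by sorting the remainder with the comparator key (abs(x), x) (a key-sorted array is a valid binary heap), instead of A's swap-to-end, two-phase sift-down and final pop; the in-place array contents after the call therefore differ (return value is identical).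
-- outside the precondition, e.g. on my_heappop([]): A raises IndexError, B raises IndexError
import Mathlib
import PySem

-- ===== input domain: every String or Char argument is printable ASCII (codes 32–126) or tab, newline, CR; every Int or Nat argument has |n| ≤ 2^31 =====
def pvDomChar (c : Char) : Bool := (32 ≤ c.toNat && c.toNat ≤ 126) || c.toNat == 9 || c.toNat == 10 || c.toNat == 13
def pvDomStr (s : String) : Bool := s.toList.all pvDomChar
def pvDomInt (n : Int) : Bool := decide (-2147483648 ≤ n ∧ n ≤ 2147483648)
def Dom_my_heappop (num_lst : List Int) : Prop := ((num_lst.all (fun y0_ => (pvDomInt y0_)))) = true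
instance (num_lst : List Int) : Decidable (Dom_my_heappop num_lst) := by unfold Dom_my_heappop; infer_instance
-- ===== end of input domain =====

-- B replaces A's swap-to-end + sift-down + pop with: pop the root directly and restore the
-- heap invariant by sorting the remainder under the comparator key (abs x, x) — a key-sorted
-- array is a valid binary heap, so no sift-down exists in B (simpler, same return value).
-- Both Pythons mutate num_lst in place, and their final array contents DIFFER; the
-- equivalence proved here is about the RETURN value only.

-- ===== PORT A =====
-- compare(a, b): abs first, then raw value
def pvCompare (a b : Int) : Bool :=
  if |a| > |b| then true
  else if |a| = |b| then (if a > b then true else false)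
  else false

-- simultaneous swap num_lst[i], num_lst[j] = num_lst[j], num_lst[i]
-- (getD 0 is exact here: every index used is in range on nonempty input, see Pre_)
def pvSwap (l : List Int) (i j : Nat) : List Int :=
  (l.set i (l.getD j 0)).set j (l.getD i 0)

-- A's while loop; fuel only makes the recursion total (idx strictly grows, length fuel suffices)
def pvDownA (fuel : Nat) (l : List Int) (idx : Nat) : List Int × Nat :=
  match fuel with
  | 0 => (l, idx)
  | fuel + 1 =>
    if 2 * idx + 2 < l.length - 1 then
      let left := 2 * idx + 1
      let right := 2 * idx + 2
      if pvCompare (l.getD left 0) (l.getD right 0) then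
        if pvCompare (l.getD idx 0) (l.getD right 0) then
          pvDownA fuel (pvSwap l idx right) right
        else (l, idx)
      else
        if pvCompare (l.getD idx 0) (l.getD left 0) then
          pvDownA fuel (pvSwap l idx left) left
        else (l, idx)
    else (l, idx)

def my_heappop (num_lst : List Int) : Int :=
  let l0 := pvSwap num_lst 0 (num_lst.length - 1)
  let r := pvDownA l0.length l0 0
  let l1 := r.1
  let idx := r.2
  let last_left := 2 * idx + 1
  -- Python: last_left == len(num_lst) - 2  (over Z; last_left ≥ 1 so this is last_left + 2 = len)
  let l2 := if last_left + 2 = l1.length then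
              (if pvCompare (l1.getD idx 0) (l1.getD last_left 0) then pvSwap l1 idx last_left else l1)
            else l1
  -- num_lst.pop(): returns the last element (in range under Pre_)
  l2.getD (l2.length - 1) 0

-- ===== PORT B =====
def my_heappop_alt (num_lst : List Int) : Int :=
  -- root = num_lst[0]  (in range under Pre_)
  let root := num_lst.getD 0 0
  -- num_lst[0] = num_lst[-1]; num_lst.pop()
  let moved := num_lst.set 0 (num_lst.getD (num_lst.length - 1) 0)
  let popped := moved.dropLast
  -- num_lst.sort(key=lambda x: (abs(x), x)) — mutates the heap in Python; does not affect the return value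
  let _heap := PySem.List.sorted2 popped (fun x => |x|) (fun x => x) false
  root

-- ===== PRECONDITION & SPEC =====
-- A raises IndexError on the empty list (num_lst[0]); B raises there too.
def Pre_my_heappop (num_lst : List Int) : Prop := num_lst ≠ []
instance (num_lst : List Int) : Decidable (Pre_my_heappop num_lst) := by unfold Pre_my_heappop; infer_instance
def pvWitness_my_heappop : List Int := ([-4, 5, -6, 7])

def Spec_my_heappop (num_lst : List Int) (out : Int) : Prop := out = my_heappop_alt num_lst
instance (num_lst : List Int) (out : Int) : Decidable (Spec_my_heappop num_lst out) := by unfold Spec_my_heappop; infer_instance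

-- ===== CLAIM (what is proved, stated in full; the proofs are below) =====
def Claim_equal_my_heappop : Prop := ∀ (num_lst : List Int), Dom_my_heappop num_lst → Pre_my_heappop num_lst → Spec_my_heappop num_lst (my_heappop num_lst)

-- ===== LEMMAS AND PROOFS =====

theorem pvSwap_length (l : List Int) (i j : Nat) : (pvSwap l i j).length = l.length := by
  simp [pvSwap]

theorem pvSwap_getD_ne (l : List Int) (i j k : Nat) (hi : k ≠ i) (hj : k ≠ j) :
    (pvSwap l i j).getD k 0 = l.getD k 0 := by
  simp [pvSwap, List.getD_eq_getElem?_getD,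
    List.getElem?_set_ne (fun h => hj h.symm), List.getElem?_set_ne (fun h => hi h.symm)]

-- A's loop preserves the length and never touches the last slot (all swapped indices < length - 1)
theorem pvDownA_inv (fuel : Nat) (l : List Int) (idx : Nat) :
    (pvDownA fuel l idx).1.length = l.length ∧
    (pvDownA fuel l idx).1.getD (l.length - 1) 0 = l.getD (l.length - 1) 0 := by
  induction fuel generalizing l idx with
  | zero => simp [pvDownA]
  | succ fuel ih =>
    simp only [pvDownA]
    split
    · next hguard =>
      have hlen := pvSwap_length l idx (2 * idx + 2)
      have hlen' := pvSwap_length l idx (2 * idx + 1)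
      split
      · split
        · have h := ih (pvSwap l idx (2 * idx + 2)) (2 * idx + 2)
          rw [hlen] at h
          refine ⟨h.1, ?_⟩
          rw [h.2, pvSwap_getD_ne] <;> omega
        · exact ⟨rfl, rfl⟩
      · split
        · have h := ih (pvSwap l idx (2 * idx + 1)) (2 * idx + 1)
          rw [hlen'] at h
          refine ⟨h.1, ?_⟩
          rw [h.2, pvSwap_getD_ne] <;> omega
        · exact ⟨rfl, rfl⟩
    · exact ⟨rfl, rfl⟩

-- A returns the original root: the initial swap parks num_lst[0] in the last slot,
-- neither the loop nor the fixup touches that slot, and pop() returns it.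
theorem my_heappop_eq_head (num_lst : List Int) (h : num_lst ≠ []) :
    my_heappop num_lst = num_lst.getD 0 0 := by
  have hn : 0 < num_lst.length := List.length_pos_iff.mpr h
  unfold my_heappop
  dsimp only
  set l0 := pvSwap num_lst 0 (num_lst.length - 1) with hl0
  have hl0len : l0.length = num_lst.length := pvSwap_length ..
  have hlast0 : l0.getD (num_lst.length - 1) 0 = num_lst.getD 0 0 := by
    rw [hl0]
    simp only [pvSwap, List.getD_eq_getElem?_getD]
    rw [List.getElem?_set_self (by simpa using Nat.sub_lt hn one_pos)]
    simp
  obtain ⟨h1, h2⟩ := pvDownA_inv l0.length l0 0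
  set r := pvDownA l0.length l0 0 with hr
  set l1 := r.1 with hl1
  set idx := r.2 with hidx
  have hl1len : l1.length = num_lst.length := by rw [h1, hl0len]
  have hl1last : l1.getD (num_lst.length - 1) 0 = num_lst.getD 0 0 := by
    rw [← hl0len, h2, hl0len, hlast0]
  split
  · next hfix =>
    -- fixup fires: 2*idx+1 = length - 2, so both swapped indices are < length - 1
    split
    · rw [pvSwap_length, hl1len, pvSwap_getD_ne _ _ _ _ (by omega) (by omega), hl1last]
    · rw [hl1len, hl1last]
  · rw [hl1len, hl1last]

-- ===== VERDICT (by name: the statement is the Claim_ definition above) =====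
theorem my_heappop_spec : Claim_equal_my_heappop := by
  intro num_lst _ hpre
  unfold Spec_my_heappop
  rw [my_heappop_eq_head num_lst hpre]
  rfl
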